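-- pv_equiv track=rewrite | github.com/supermassive-intelligence/scalarlm | ml/adapters/merge_lora_and_push.py | strip_default_adapter_segment
-- ===== SOURCE A (Python) =====
-- def strip_default_adapter_segment(key: str) -> str:
--     """
--     Drop the `.default.` (or any other adapter-name) segment between
--     `lora_A`/`lora_B` and `weight`. Returns the input unchanged if
--     the pattern doesn't apply.
--     """
--     parts = key.split(".")
--     # Locate the lora_* token and check the very next segment looks
--     # like an adapter name (not "weight" / "bias" itself). When we
--     # hit that shape, drop the adapter-name segment.
--     for i in range(len(parts) - 2):
--         if parts[i] in ("lora_A", "lora_B", "lora_embedding_A", "lora_embedding_B"):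
--             tail = parts[i + 1]
--             terminal = parts[i + 2] if i + 2 < len(parts) else ""
--             if tail not in ("weight", "bias") and terminal in ("weight", "bias"):
--                 return ".".join(parts[: i + 1] + parts[i + 2 :])
--     return key
-- ===== SOURCE B (Python) =====
-- def strip_default_adapter_segment(key: str) -> str:
--     """
--     Drop the `.default.` (or any other adapter-name) segment between
--     `lora_A`/`lora_B` and `weight`. Returns the input unchanged if
--     the pattern doesn't apply.
--     """
--
--     def go(parts):
--         # Recursively walk the segment list; rewrite the first 3-segment
--         # window (lora_* token, adapter name, weight/bias) that matches,
--         # or report None when no window matches.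
--         if len(parts) < 3:
--             return None
--         head, tail, terminal = parts[0], parts[1], parts[2]
--         if (head in ("lora_A", "lora_B", "lora_embedding_A", "lora_embedding_B")
--                 and tail not in ("weight", "bias")
--                 and terminal in ("weight", "bias")):
--             return [head] + parts[2:]
--         rest = go(parts[1:])
--         return None if rest is None else [head] + rest
--
--     stripped = go(key.split("."))
--     return key if stripped is None else ".".join(stripped)
-- ===== Notes on version B (the rewrite author's own statement) =====
-- stated objective: alternative
-- what changed: Replaces the index loop with slicing and early return by a structural recursion over the segment list that returns an Option: None when no 3-segment window matches (key returned unchanged), or the rewritten list built head-first.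
import Mathlib
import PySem

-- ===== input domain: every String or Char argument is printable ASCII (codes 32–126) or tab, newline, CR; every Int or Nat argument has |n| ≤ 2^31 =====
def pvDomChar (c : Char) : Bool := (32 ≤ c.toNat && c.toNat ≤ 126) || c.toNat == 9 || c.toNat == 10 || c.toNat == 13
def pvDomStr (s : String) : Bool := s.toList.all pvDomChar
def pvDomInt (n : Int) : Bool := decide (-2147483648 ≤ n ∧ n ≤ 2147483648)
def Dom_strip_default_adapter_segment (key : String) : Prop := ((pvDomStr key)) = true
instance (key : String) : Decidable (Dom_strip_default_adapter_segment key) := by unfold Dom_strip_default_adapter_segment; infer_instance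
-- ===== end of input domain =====

-- B replaces A's index loop (with slicing and early return) by a structural recursion
-- over the segment list returning an Option; alternative decomposition, same cost.


-- ===== PORT A =====
-- the `for i in range(len(parts) - 2)` loop with early return
def stripLoopA (key : String) (parts : List String) (i : Nat) : String :=
  if _h : i < parts.length - 2 then
    -- parts[i] / parts[i+1] are always in range here (i < len-2); .getD "" is never taken
    let pi := (PySem.List.pyGet? parts (i : Int)).getD ""
    if pi ∈ ["lora_A", "lora_B", "lora_embedding_A", "lora_embedding_B"] then
      let tail := (PySem.List.pyGet? parts ((i : Int) + 1)).getD ""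
      let terminal := if (i : Int) + 2 < parts.length then
          (PySem.List.pyGet? parts ((i : Int) + 2)).getD "" else ""
      if tail ∉ ["weight", "bias"] ∧ terminal ∈ ["weight", "bias"] then
        PySem.Str.join "." (PySem.List.slice parts none (some ((i : Int) + 1)) ++
                            PySem.List.slice parts (some ((i : Int) + 2)) none)
      else stripLoopA key parts (i + 1)
    else stripLoopA key parts (i + 1)
  else key
termination_by parts.length - i
decreasing_by all_goals omega

def strip_default_adapter_segment (key : String) : String :=
  -- parts = key.split("."): sep "." is nonempty, so split? is always some
  stripLoopA key ((PySem.Str.split? key ".").getD []) 0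

-- ===== PORT B =====
-- Source B's inner `go`: None when no 3-segment window matches, else the rewritten list
def goB (parts : List String) : Option (List String) :=
  match parts with
  | head :: tail :: terminal :: rest =>
    if head ∈ ["lora_A", "lora_B", "lora_embedding_A", "lora_embedding_B"] ∧
       tail ∉ ["weight", "bias"] ∧ terminal ∈ ["weight", "bias"] then
      some (head :: terminal :: rest)
    else
      match goB (tail :: terminal :: rest) with
      | none => none
      | some r => some (head :: r)
  | _ => none

def strip_default_adapter_segment_alt (key : String) : String :=
  match goB ((PySem.Str.split? key ".").getD []) with
  | none => key
  | some r => PySem.Str.join "." r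

-- ===== PRECONDITION & SPEC =====
def Spec_strip_default_adapter_segment (key : String) (out : String) : Prop := out = strip_default_adapter_segment_alt key
instance (key : String) (out : String) : Decidable (Spec_strip_default_adapter_segment key out) := by unfold Spec_strip_default_adapter_segment; infer_instance

-- ===== CLAIM (what is proved, stated in full; the proofs are below) =====
def Claim_equal_strip_default_adapter_segment : Prop := ∀ (key : String), Dom_strip_default_adapter_segment key → Spec_strip_default_adapter_segment key (strip_default_adapter_segment key)

-- ===== LEMMAS AND PROOFS =====

-- loop invariant: A's loop on pre ++ suf starting at index pre.length computes
-- what B's recursion computes on suf (with pre re-attached on a rewrite).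
theorem stripLoopA_eq_goB (key : String) :
    ∀ (suf pre : List String),
      stripLoopA key (pre ++ suf) pre.length =
        (match goB suf with
         | none => key
         | some r => PySem.Str.join "." (pre ++ r)) := by
  intro suf
  induction suf with
  | nil =>
    intro pre
    rw [List.append_nil, stripLoopA, dif_neg (by omega)]
    simp only [goB]
  | cons a suf' ih =>
    intro pre
    match suf' with
    | [] =>
      have hn : ¬ pre.length < (pre ++ [a]).length - 2 := by
        simp only [List.length_append, List.length_cons, List.length_nil]; omega
      rw [stripLoopA, dif_neg hn]
      simp only [goB]
    | [b] =>
      have hn : ¬ pre.length < (pre ++ [a, b]).length - 2 := by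
        simp only [List.length_append, List.length_cons, List.length_nil]; omega
      rw [stripLoopA, dif_neg hn]
      simp only [goB]
    | b :: c :: rest =>
      rw [stripLoopA]
      have hlen : pre.length < (pre ++ a :: b :: c :: rest).length - 2 := by
        simp only [List.length_append, List.length_cons]; omega
      have hget0 : PySem.List.pyGet? (pre ++ a :: b :: c :: rest) (pre.length : Int) = some a := by
        rw [PySem.List.pyGet?_natCast, List.getElem?_append_right (Nat.le_refl _),
          Nat.sub_self]; rfl
      have hget1 : PySem.List.pyGet? (pre ++ a :: b :: c :: rest) ((pre.length : Int) + 1) = some b := by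
        rw [show ((pre.length : Int) + 1) = ((pre.length + 1 : Nat) : Int) by omega,
          PySem.List.pyGet?_natCast, List.getElem?_append_right (by omega),
          Nat.add_sub_cancel_left]; rfl
      have hget2 : PySem.List.pyGet? (pre ++ a :: b :: c :: rest) ((pre.length : Int) + 2) = some c := by
        rw [show ((pre.length : Int) + 2) = ((pre.length + 2 : Nat) : Int) by omega,
          PySem.List.pyGet?_natCast, List.getElem?_append_right (by omega),
          Nat.add_sub_cancel_left]; rfl
      have hterm : ((pre.length : Int) + 2 < ((pre ++ a :: b :: c :: rest).length : Int)) := by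
        simp only [List.length_append, List.length_cons]; omega
      have hstep : stripLoopA key (pre ++ a :: b :: c :: rest) (pre.length + 1) =
          (match goB (b :: c :: rest) with
           | none => key
           | some r => PySem.Str.join "." (pre ++ a :: r)) := by
        have h := ih (pre ++ [a])
        simp only [List.append_assoc, List.singleton_append, List.length_append,
          List.length_cons, List.length_nil] at h
        exact h
      by_cases hA : a ∈ ["lora_A", "lora_B", "lora_embedding_A", "lora_embedding_B"]
      · by_cases hBC : b ∉ ["weight", "bias"] ∧ c ∈ ["weight", "bias"]
        · -- match found: A slices, B rewrites the window
          rw [dif_pos hlen]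
          simp only [hget0, hget1, hget2, Option.getD_some, if_pos hA, if_pos hterm,
            if_pos hBC]
          rw [show ((pre.length : Int) + 1) = ((pre.length + 1 : Nat) : Int) by omega,
            show ((pre.length : Int) + 2) = ((pre.length + 2 : Nat) : Int) by omega,
            PySem.List.slice_to_natCast, PySem.List.slice_from_natCast,
            List.take_append, List.drop_append]
          simp only [goB, if_pos (And.intro hA hBC)]
          simp [List.take_of_length_le, List.drop_eq_nil_of_le]
        · -- window rejected on tail/terminal: A advances i, B recurses on the tail
          rw [dif_pos hlen]
          simp only [hget0, hget1, hget2, Option.getD_some, if_pos hA, if_pos hterm,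
            if_neg hBC]
          rw [hstep]
          simp only [goB, if_neg (by tauto :
            ¬ (a ∈ ["lora_A", "lora_B", "lora_embedding_A", "lora_embedding_B"] ∧
               b ∉ ["weight", "bias"] ∧ c ∈ ["weight", "bias"]))]
          cases hg : goB (b :: c :: rest) <;> rfl
      · -- window rejected on the lora token: A advances i, B recurses on the tail
        rw [dif_pos hlen]
        simp only [hget0, Option.getD_some, if_neg hA]
        rw [hstep]
        simp only [goB, if_neg (by tauto :
          ¬ (a ∈ ["lora_A", "lora_B", "lora_embedding_A", "lora_embedding_B"] ∧
             b ∉ ["weight", "bias"] ∧ c ∈ ["weight", "bias"]))]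
        cases hg : goB (b :: c :: rest) <;> rfl

-- ===== VERDICT (by name: the statement is the Claim_ definition above) =====
theorem strip_default_adapter_segment_spec : Claim_equal_strip_default_adapter_segment := by
  intro key _
  unfold Spec_strip_default_adapter_segment strip_default_adapter_segment
    strip_default_adapter_segment_alt
  have h := stripLoopA_eq_goB key ((PySem.Str.split? key ".").getD []) []
  simp only [List.nil_append, List.length_nil] at h
  rw [h]
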